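-- pv_equiv track=rewrite | github.com/geeick/AdventOfCode2024 | Problem 7/problem7_pt2.py | determineOperators
-- ===== SOURCE A (Python) =====
-- def determineOperators(combinations, iteration):
--     operators_list = ['+', '*', '||']
--     operators = []
--
--     for combination in range(combinations):
--         options = []
--         for index in range(iteration):
--             options.append(operators_list[(combination // (3 ** (iteration - index - 1))) % 3])
--         operators.append(options)
--
--     return operators
-- ===== SOURCE B (Python) =====
-- def determineOperators(combinations, iteration):
--     if combinations <= 0:
--         return []
--     operators_list = ['+', '*', '||']
--     n = iteration if iteration > 0 else 0
--     digits = [0] * n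
--     operators = []
--     for _ in range(combinations):
--         operators.append([operators_list[d] for d in digits])
--         # increment the base-3 odometer from the right (wraps on overflow)
--         i = n - 1
--         while i >= 0:
--             digits[i] += 1
--             if digits[i] == 3:
--                 digits[i] = 0
--                 i -= 1
--             else:
--                 break
--     return operators
-- ===== Notes on version B (the rewrite author's own statement) =====
-- stated objective: faster
-- what changed: B enumerates the rows with an in-place base-3 odometer digit list carried between rows (amortized O(1) small-int increments), instead of recomputing every digit with a fresh 3**(iteration-index-1) big-int power and division per cell; the odometer's wrap-around reproduces A's modular cycling, and B returns [] immediately for non-positive combinations.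
import Mathlib
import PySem

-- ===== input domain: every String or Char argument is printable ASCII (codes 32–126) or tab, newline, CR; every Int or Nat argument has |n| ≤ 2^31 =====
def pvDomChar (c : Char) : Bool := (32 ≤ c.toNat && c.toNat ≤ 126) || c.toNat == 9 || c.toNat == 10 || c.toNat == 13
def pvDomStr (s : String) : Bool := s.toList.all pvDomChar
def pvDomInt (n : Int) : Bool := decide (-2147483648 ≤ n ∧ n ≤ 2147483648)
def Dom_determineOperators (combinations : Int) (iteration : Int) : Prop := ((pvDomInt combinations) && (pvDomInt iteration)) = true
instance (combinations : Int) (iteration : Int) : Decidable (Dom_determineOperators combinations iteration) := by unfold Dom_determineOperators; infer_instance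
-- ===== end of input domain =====

-- B re-enumerates the same rows by an in-place base-3 odometer carried between rows instead
-- of recomputing every digit with 3**(iteration-index-1); same order, same wrap-around.

-- ===== PORT A =====
-- Literal port of A. The exponent (iteration - index - 1) is ≥ 0 for every index that
-- range(iteration) produces, so .toNat is exact; the computed index is a Python '% 3',
-- always in [0,3), so pyGetD with a dummy default is exact (Python never raises here).
def determineOperators (combinations : Int) (iteration : Int) : List (List String) :=
  let operators_list : List String := ["+", "*", "||"]
  (PySem.List.pyRange 0 combinations 1).foldl
    (fun operators combination =>
      operators ++
        [(PySem.List.pyRange 0 iteration 1).foldl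
          (fun options index =>
            options ++
              [PySem.List.pyGetD operators_list
                (PySem.Int.mod
                  (PySem.Int.floordiv combination ((3 : Int) ^ (iteration - index - 1).toNat)) 3)
                ""])
          []])
    []

-- ===== PORT B =====
-- the `while i >= 0` carry loop of Source B, transcribed structurally on the reversed digit list
def pvIncFromRight : List Int → List Int
  | [] => []
  | d :: ds => if d + 1 = 3 then 0 :: pvIncFromRight ds else (d + 1) :: ds

-- the `for _ in range(combinations)` loop of Source B (fuel = number of rows still to emit)
def pvBLoop : Nat → List Int → List (List String) → List (List String)
  | 0, _, operators => operators
  | k + 1, digits, operators =>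
      pvBLoop k ((pvIncFromRight digits.reverse).reverse)
        (operators ++ [digits.map (fun d => PySem.List.pyGetD ["+", "*", "||"] d "")])

def determineOperators_alt (combinations : Int) (iteration : Int) : List (List String) :=
  if combinations ≤ 0 then []
  else pvBLoop combinations.toNat (List.replicate iteration.toNat 0) []

-- ===== PRECONDITION & SPEC =====
def Spec_determineOperators (combinations : Int) (iteration : Int) (out : List (List String)) : Prop := out = determineOperators_alt combinations iteration
instance (combinations : Int) (iteration : Int) (out : List (List String)) : Decidable (Spec_determineOperators combinations iteration out) := by unfold Spec_determineOperators; infer_instance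

-- ===== CLAIM (what is proved, stated in full; the proofs are below) =====
def Claim_equal_determineOperators : Prop := ∀ (combinations : Int) (iteration : Int), Dom_determineOperators combinations iteration → Spec_determineOperators combinations iteration (determineOperators combinations iteration)

-- ===== LEMMAS AND PROOFS =====

-- little-endian base-3 digits of k, n of them
def pvDigitsLE : Nat → Nat → List Int
  | 0, _ => []
  | n + 1, k => ((k % 3 : Nat) : Int) :: pvDigitsLE n (k / 3)

theorem pvDigitsLE_length (n k : Nat) : (pvDigitsLE n k).length = n := by
  induction n generalizing k with
  | zero => rfl
  | succ n ih => simp [pvDigitsLE, ih]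

theorem pvDigitsLE_zero (n : Nat) : pvDigitsLE n 0 = List.replicate n 0 := by
  induction n with
  | zero => rfl
  | succ n ih => simp [pvDigitsLE, ih, List.replicate_succ]

theorem pvInc_digitsLE (n k : Nat) : pvIncFromRight (pvDigitsLE n k) = pvDigitsLE n (k + 1) := by
  induction n generalizing k with
  | zero => rfl
  | succ n ih =>
    by_cases h : k % 3 = 2
    · have h1 : (k + 1) % 3 = 0 := by omega
      have h2 : (k + 1) / 3 = k / 3 + 1 := by omega
      simp [pvDigitsLE, pvIncFromRight, h, h1, h2, ih]
    · have h1 : (k + 1) % 3 = k % 3 + 1 := by omega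
      have h2 : (k + 1) / 3 = k / 3 := by omega
      simp [pvDigitsLE, pvIncFromRight, h1, h2]
      intro hc
      exfalso
      omega

theorem pvDigitsLE_getElem (n k j : Nat) (h : j < n) :
    (pvDigitsLE n k)[j]'(by simp [pvDigitsLE_length]; omega) = ((k / 3 ^ j % 3 : Nat) : Int) := by
  induction n generalizing k j with
  | zero => omega
  | succ n ih =>
    cases j with
    | zero => simp [pvDigitsLE]
    | succ j =>
      have := ih (k / 3) j (by omega)
      simpa [pvDigitsLE, Nat.div_div_eq_div_mul, pow_succ, Nat.mul_comm] using this

def pvRow (digits : List Int) : List String :=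
  digits.map (fun d => PySem.List.pyGetD ["+", "*", "||"] d "")

theorem pvBLoop_spec (n m k : Nat) (acc : List (List String)) :
    pvBLoop m ((pvDigitsLE n k).reverse) acc =
      acc ++ (List.range m).map (fun t => pvRow ((pvDigitsLE n (k + t)).reverse)) := by
  induction m generalizing k acc with
  | zero => simp [pvBLoop]
  | succ m ih =>
    rw [pvBLoop, List.reverse_reverse, pvInc_digitsLE, ih (k + 1)]
    rw [List.range_succ_eq_map]
    have hsh : ∀ t : Nat, k + 1 + t = k + (t + 1) := fun t => by omega
    simp [pvRow, List.map_map, Function.comp, hsh]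

-- A's row for combination kk equals B's row from the odometer state
theorem pvRowA_eq (n kk : Nat) :
    (List.range n).map
        (fun j => PySem.List.pyGetD ["+", "*", "||"] ((kk / 3 ^ (n - 1 - j) % 3 : Nat) : Int) "") =
      pvRow ((pvDigitsLE n kk).reverse) := by
  apply List.ext_getElem
  · simp [pvRow, pvDigitsLE_length]
  · intro j h1 h2
    have hj : j < n := by simpa using h1
    simp [pvRow, List.getElem_reverse, pvDigitsLE_length]
    rw [pvDigitsLE_getElem n kk (n - 1 - j) (by omega)]
    norm_cast

theorem pvRange_nat (n : Int) :
    PySem.List.pyRange 0 n 1 = (List.range n.toNat).map (fun k => ((k : Int))) := by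
  rw [PySem.List.pyRange_one]
  norm_num
  exact List.map_eq_flatMap

theorem pvCell_eq (kk e : Nat) :
    PySem.Int.mod (PySem.Int.floordiv (kk : Int) ((3 : Int) ^ e)) 3 =
      ((kk / 3 ^ e % 3 : Nat) : Int) := by
  have h1 : PySem.Int.floordiv (kk : Int) ((3 : Int) ^ e) = ((kk / 3 ^ e : Nat) : Int) := by
    exact_mod_cast PySem.Int.floordiv_natCast kk (3 ^ e)
  rw [h1]
  exact_mod_cast PySem.Int.mod_natCast (kk / 3 ^ e) 3

-- ===== VERDICT (by name: the statement is the Claim_ definition above) =====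
theorem determineOperators_spec : Claim_equal_determineOperators := by
  intro c i _
  unfold Spec_determineOperators determineOperators determineOperators_alt
  by_cases hc : c ≤ 0
  · simp [hc, PySem.List.pyRange_one_eq_nil hc]
  simp only [hc, if_false]
  rw [show List.replicate i.toNat (0 : Int) = (pvDigitsLE i.toNat 0).reverse by
        rw [pvDigitsLE_zero, List.reverse_replicate]]
  rw [pvBLoop_spec i.toNat c.toNat 0]
  rw [pvRange_nat c, List.foldl_map, PySem.List.foldl_append_singleton_eq_map]
  simp only [List.nil_append, List.pure_def, List.bind_eq_flatMap, ← List.map_eq_flatMap,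
    List.map_map]
  apply List.map_congr_left
  intro kk _
  simp only [Function.comp_apply, Nat.zero_add]
  rw [ pvRange_nat i, List.foldl_map, PySem.List.foldl_append_singleton_eq_map]
  rw [← pvRowA_eq i.toNat kk]
  simp only [List.nil_append, List.pure_def, List.bind_eq_flatMap, ← List.map_eq_flatMap,
    List.map_map]
  apply List.map_congr_left
  intro j hj
  have hj' : j < i.toNat := List.mem_range.mp hj
  have he : (i - (j : Int) - 1).toNat = i.toNat - 1 - j := by omega
  simp only [Function.comp_apply, he, pvCell_eq]
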